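-- pv_equiv track=rewrite | github.com/Jobeer1/Ubuntu-Patient-Care | mcp-medical-server/cli/approve_request.py | validate_req_id
-- ===== SOURCE A (Python) =====
-- def validate_req_id(req_id: str) -> bool:
--     """
--     Validate request ID format.
--
--     Expected format: REQ-YYYYMMDD-HHMMSS-{12-hex-random}
--     Example: REQ-20251110-120000-abc123def456
--
--     Args:
--         req_id: Request ID to validate
--
--     Returns:
--         True if valid, False otherwise
--     """
--     parts = req_id.split('-')
--     if len(parts) != 4:
--         return False
--
--     if parts[0] != 'REQ':
--         return False
--
--     # Check date format (YYYYMMDD)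
--     if len(parts[1]) != 8 or not parts[1].isdigit():
--         return False
--
--     # Check time format (HHMMSS)
--     if len(parts[2]) != 6 or not parts[2].isdigit():
--         return False
--
--     # Check random part (hex)
--     if not all(c in '0123456789abcdefABCDEF' for c in parts[3]):
--         return False
--
--     return True
-- ===== SOURCE B (Python) =====
-- HEX = '0123456789abcdefABCDEF'
--
-- def validate_req_id(req_id: str) -> bool:
--     # Direct positional parse: the format is fixed-width except the hex tail,
--     # so check the three dashes at their exact positions and test each field
--     # by slicing -- no split, no part list.
--     return (req_id[:4] == 'REQ-'
--             and req_id[12:13] == '-'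
--             and req_id[19:20] == '-'
--             and req_id[4:12].isdigit()
--             and req_id[13:19].isdigit()
--             and all(c in HEX for c in req_id[20:]))
-- ===== Notes on version B (the rewrite author's own statement) =====
-- stated objective: simpler
-- what changed: B replaces A's split-on-dash-then-inspect-4-parts algorithm with a direct fixed-position parse: it checks the three dashes at their exact offsets (3, 12, 19) and validates each field by slicing, with no part list at all.
import Mathlib
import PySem

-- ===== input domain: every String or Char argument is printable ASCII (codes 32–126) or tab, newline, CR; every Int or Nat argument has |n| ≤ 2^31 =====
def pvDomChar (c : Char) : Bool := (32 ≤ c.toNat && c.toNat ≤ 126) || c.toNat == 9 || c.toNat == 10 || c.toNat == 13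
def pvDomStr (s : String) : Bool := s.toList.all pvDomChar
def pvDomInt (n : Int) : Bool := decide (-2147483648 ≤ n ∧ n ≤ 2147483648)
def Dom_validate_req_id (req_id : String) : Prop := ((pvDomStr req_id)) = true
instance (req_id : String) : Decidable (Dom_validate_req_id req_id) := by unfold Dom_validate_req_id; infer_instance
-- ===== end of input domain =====

-- B validates by a direct fixed-position parse (dashes at offsets 3, 12, 19 plus per-field
-- slice checks) instead of A's split-on-dash into a 4-part list; same values, simpler shape.

-- shared character test: c in '0123456789abcdefABCDEF'
def hexDigit (c : Char) : Bool :=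
  "0123456789abcdefABCDEF".toList.contains c

-- ===== PORT A =====
def validate_req_id (req_id : String) : Bool :=
  let parts := PySem.Chars.splitOn req_id.toList ['-']
  if parts.length ≠ 4 then false
  else if PySem.List.pyGetD parts 0 [] ≠ ['R', 'E', 'Q'] then false
  else if PySem.Chars.len (PySem.List.pyGetD parts 1 []) ≠ 8 ∨
          ¬ PySem.Chars.strIsdigit (PySem.List.pyGetD parts 1 []) then false
  else if PySem.Chars.len (PySem.List.pyGetD parts 2 []) ≠ 6 ∨
          ¬ PySem.Chars.strIsdigit (PySem.List.pyGetD parts 2 []) then false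
  else if ¬ (PySem.List.pyGetD parts 3 []).all hexDigit then false
  else true

-- ===== PORT B =====
def validate_req_id_alt (req_id : String) : Bool :=
  let cs := req_id.toList
  decide (PySem.List.slice cs none (some 4) = ['R', 'E', 'Q', '-']) &&
  decide (PySem.List.slice cs (some 12) (some 13) = ['-']) &&
  decide (PySem.List.slice cs (some 19) (some 20) = ['-']) &&
  PySem.Chars.strIsdigit (PySem.List.slice cs (some 4) (some 12)) &&
  PySem.Chars.strIsdigit (PySem.List.slice cs (some 13) (some 19)) &&
  (PySem.List.slice cs (some 20) none).all hexDigit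

-- ===== PRECONDITION & SPEC =====
def Spec_validate_req_id (req_id : String) (out : Bool) : Prop := out = validate_req_id_alt req_id
instance (req_id : String) (out : Bool) : Decidable (Spec_validate_req_id req_id out) := by unfold Spec_validate_req_id; infer_instance

-- ===== CLAIM (what is proved, stated in full; the proofs are below) =====
def Claim_equal_validate_req_id : Prop := ∀ (req_id : String), Dom_validate_req_id req_id → Spec_validate_req_id req_id (validate_req_id req_id)

-- ===== LEMMAS AND PROOFS =====

-- structural model of str.split('-')
def mySplit : List Char → List (List Char)
  | [] => [[]]
  | c :: rest =>
    if c = '-' then [] :: mySplit rest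
    else
      match mySplit rest with
      | [] => [[c]]
      | p :: ps => (c :: p) :: ps

-- prepend a chunk onto the head part
def consH (p : List Char) : List (List Char) → List (List Char)
  | [] => [p]
  | q :: qs => (p ++ q) :: qs

theorem mySplit_ne_nil (cs : List Char) : mySplit cs ≠ [] := by
  cases cs with
  | nil => simp [mySplit]
  | cons c rest =>
    simp only [mySplit]
    split
    · simp
    · split <;> simp

theorem splitOn_go_eq (fuel : Nat) : ∀ (l cur : List Char) (acc : List (List Char)),
    l.length ≤ fuel →
    PySem.Chars.splitOn.go ['-'] fuel l cur acc = acc.reverse ++ consH cur.reverse (mySplit l) := by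
  induction fuel with
  | zero =>
    intro l cur acc h
    have : l = [] := by cases l <;> simp_all
    subst this
    simp [PySem.Chars.splitOn.go, mySplit, consH]
  | succ n ih =>
    intro l cur acc h
    cases l with
    | nil => simp [PySem.Chars.splitOn.go, mySplit, consH]
    | cons c rest =>
      by_cases hc : c = '-'
      · subst hc
        rw [show PySem.Chars.splitOn.go ['-'] (n+1) ('-'::rest) cur acc
              = PySem.Chars.splitOn.go ['-'] n rest [] (cur.reverse :: acc) by
            simp [PySem.Chars.splitOn.go, List.isPrefixOf]]
        rw [ih rest [] _ (by simpa using h)]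
        obtain ⟨q, qs, hq⟩ : ∃ q qs, mySplit rest = q :: qs := by
          cases hr : mySplit rest with
          | nil => exact absurd hr (mySplit_ne_nil rest)
          | cons q qs => exact ⟨q, qs, rfl⟩
        simp [mySplit, hq, consH]
      · rw [show PySem.Chars.splitOn.go ['-'] (n+1) (c::rest) cur acc
              = PySem.Chars.splitOn.go ['-'] n rest (c :: cur) acc by
            simp [PySem.Chars.splitOn.go, List.isPrefixOf, Ne.symm hc]]
        rw [ih rest _ _ (by simpa using h)]
        simp only [mySplit, hc, if_false]
        cases hr : mySplit rest with
        | nil => simp [consH]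
        | cons q qs => simp [consH]

theorem splitOn_eq_mySplit (cs : List Char) : PySem.Chars.splitOn cs ['-'] = mySplit cs := by
  rw [show PySem.Chars.splitOn cs ['-'] = PySem.Chars.splitOn.go ['-'] (cs.length + 1) cs [] [] from rfl]
  rw [splitOn_go_eq (cs.length + 1) cs [] [] (by omega)]
  cases hr : mySplit cs with
  | nil => exact absurd hr (mySplit_ne_nil cs)
  | cons q qs => simp [consH]

-- join the parts back with dashes
def joinD : List (List Char) → List Char
  | [] => []
  | [p] => p
  | p :: ps => p ++ '-' :: joinD ps

theorem joinD_mySplit (cs : List Char) : joinD (mySplit cs) = cs := by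
  induction cs with
  | nil => simp [mySplit, joinD]
  | cons c rest ih =>
    simp only [mySplit]
    obtain ⟨q, qs, hq⟩ : ∃ q qs, mySplit rest = q :: qs := by
      cases hr : mySplit rest with
      | nil => exact absurd hr (mySplit_ne_nil rest)
      | cons q qs => exact ⟨q, qs, rfl⟩
    by_cases hc : c = '-'
    · subst hc
      rw [if_pos rfl, hq]
      rw [hq] at ih
      cases qs with
      | nil => simp_all [joinD]
      | cons q2 qs2 => simp_all [joinD]
    · rw [if_neg hc, hq]
      rw [hq] at ih
      cases qs with
      | nil => simp_all [joinD]
      | cons q2 qs2 => simp_all [joinD]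

theorem mySplit_dashfree (p : List Char) (hp : '-' ∉ p) : mySplit p = [p] := by
  induction p with
  | nil => simp [mySplit]
  | cons c rest ih =>
    have hc : c ≠ '-' := fun h => hp (by simp [h])
    have hr : '-' ∉ rest := fun h => hp (by simp [h])
    simp [mySplit, hc, ih hr]

theorem mySplit_append_dash (p rest : List Char) (hp : '-' ∉ p) :
    mySplit (p ++ '-' :: rest) = p :: mySplit rest := by
  induction p with
  | nil => simp [mySplit]
  | cons c q ih =>
    have hc : c ≠ '-' := fun h => hp (by simp [h])
    have hq : '-' ∉ q := fun h => hp (by simp [h])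
    simp [mySplit, hc, ih hq]


-- the common content of both validity checks, on the three variable fields
def Fields (p1 p2 p3 : List Char) : Prop :=
  p1.length = 8 ∧ PySem.Chars.strIsdigit p1 = true ∧
  p2.length = 6 ∧ PySem.Chars.strIsdigit p2 = true ∧ p3.all hexDigit = true

theorem no_dash_of_digits (p : List Char) (h : PySem.Chars.strIsdigit p = true) : '-' ∉ p := by
  simp [PySem.Chars.strIsdigit, List.all_eq_true] at h
  intro hm
  have := h.2 _ hm
  simp [PySem.Chars.isdigit] at this

theorem no_dash_of_hex (p : List Char) (h : p.all hexDigit = true) : '-' ∉ p := by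
  simp [List.all_eq_true] at h
  intro hm
  have := h _ hm
  simp [hexDigit] at this

theorem ite_false_eq_true_iff {C : Prop} [Decidable C] {x : Bool} :
    (if C then false else x) = true ↔ ¬C ∧ x = true := by
  split_ifs with h <;> simp [h]

theorem length_eq_four {α : Type} (l : List α) (h : l.length = 4) :
    ∃ a b c d, l = [a, b, c, d] := by
  match l, h with
  | [a, b, c, d], _ => exact ⟨a, b, c, d, rfl⟩

theorem A_true_iff (s : String) :
    validate_req_id s = true ↔
      ∃ p1 p2 p3, mySplit s.toList = [['R','E','Q'], p1, p2, p3] ∧ Fields p1 p2 p3 := by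
  unfold validate_req_id
  simp only [splitOn_eq_mySplit, ite_false_eq_true_iff, not_not, not_or, not_not]
  constructor
  · rintro ⟨h1, h2, ⟨h3a, h3b⟩, ⟨h4a, h4b⟩, h5, -⟩
    obtain ⟨a, b, c, d, hp⟩ := length_eq_four _ h1
    rw [hp] at h2 h3a h3b h4a h4b h5
    simp [PySem.List.pyGetD, PySem.List.pyGet?, PySem.List.pyIdx?] at h2 h3a h3b h4a h4b h5
    refine ⟨b, c, d, by rw [hp, h2], ?_, h3b, ?_, h4b, by simpa [List.all_eq_true] using h5⟩
    · exact_mod_cast h3a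
    · exact_mod_cast h4a
  · rintro ⟨p1, p2, p3, hp, hl1, hd1, hl2, hd2, hh⟩
    rw [hp]
    refine ⟨by simp, by simp [PySem.List.pyGetD, PySem.List.pyGet?, PySem.List.pyIdx?], ⟨?_, ?_⟩, ⟨?_, ?_⟩, ?_, trivial⟩
    · simp [PySem.List.pyGetD, PySem.List.pyGet?, PySem.List.pyIdx?, PySem.Chars.len, hl1]
    · simpa [PySem.List.pyGetD, PySem.List.pyGet?, PySem.List.pyIdx?] using hd1
    · simp [PySem.List.pyGetD, PySem.List.pyGet?, PySem.List.pyIdx?, PySem.Chars.len, hl2]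
    · simpa [PySem.List.pyGetD, PySem.List.pyGet?, PySem.List.pyIdx?] using hd2
    · simpa [PySem.List.pyGetD, PySem.List.pyGet?, PySem.List.pyIdx?] using hh

theorem B_true_iff (s : String) :
    validate_req_id_alt s = true ↔
      ∃ p1 p2 p3, s.toList = 'R'::'E'::'Q'::'-'::(p1 ++ '-'::(p2 ++ '-'::p3)) ∧ Fields p1 p2 p3 := by
  unfold validate_req_id_alt
  generalize s.toList = cs
  have e1 : PySem.List.slice cs none (some 4) = cs.take 4 := by
    simpa using PySem.List.slice_to_natCast (b := 4) (xs := cs)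
  have e2 : PySem.List.slice cs (some 12) (some 13) = (cs.drop 12).take 1 := by
    simpa using PySem.List.slice_natCast (xs := cs) (a := 12) (b := 13)
  have e3 : PySem.List.slice cs (some 19) (some 20) = (cs.drop 19).take 1 := by
    simpa using PySem.List.slice_natCast (xs := cs) (a := 19) (b := 20)
  have e4 : PySem.List.slice cs (some 4) (some 12) = (cs.drop 4).take 8 := by
    simpa using PySem.List.slice_natCast (xs := cs) (a := 4) (b := 12)
  have e5 : PySem.List.slice cs (some 13) (some 19) = (cs.drop 13).take 6 := by
    simpa using PySem.List.slice_natCast (xs := cs) (a := 13) (b := 19)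
  have e6 : PySem.List.slice cs (some 20) none = cs.drop 20 := by
    simpa using PySem.List.slice_from_natCast (a := 20) (xs := cs)
  simp only [e1, e2, e3, e4, e5, e6, Bool.and_eq_true, decide_eq_true_eq]
  constructor
  · rintro ⟨⟨⟨⟨⟨h1, h2⟩, h3⟩, h4⟩, h5⟩, h6⟩
    have hlen12 : 12 < cs.length := by
      by_contra hc
      rw [List.drop_eq_nil_of_le (by omega)] at h2
      simp at h2
    have hlen19 : 19 < cs.length := by
      by_contra hc
      rw [List.drop_eq_nil_of_le (by omega)] at h3
      simp at h3
    refine ⟨(cs.drop 4).take 8, (cs.drop 13).take 6, cs.drop 20, ?_, ?_, h4, ?_, h5, h6⟩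
    · have d12 : cs.drop 12 = '-' :: cs.drop 13 := by
        conv_lhs => rw [← List.take_append_drop 1 (cs.drop 12)]
        rw [h2]
        simp [List.drop_drop]
      have d19 : cs.drop 19 = '-' :: cs.drop 20 := by
        conv_lhs => rw [← List.take_append_drop 1 (cs.drop 19)]
        rw [h3]
        simp [List.drop_drop]
      have d13 : cs.drop 13 = (cs.drop 13).take 6 ++ '-' :: cs.drop 20 := by
        conv_lhs => rw [← List.take_append_drop 6 (cs.drop 13)]
        rw [List.drop_drop]
        norm_num [d19]
      have d4 : cs.drop 4 = (cs.drop 4).take 8 ++ '-' :: ((cs.drop 13).take 6 ++ '-' :: cs.drop 20) := by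
        conv_lhs => rw [← List.take_append_drop 8 (cs.drop 4)]
        rw [List.drop_drop]
        norm_num [d12, ← d13]
      conv_lhs => rw [← List.take_append_drop 4 cs, h1, d4]
      rfl
    · rw [List.length_take, List.length_drop]
      omega
    · rw [List.length_take, List.length_drop]
      omega
  · rintro ⟨p1, p2, p3, rfl, hl1, hd1, hl2, hd2, hh⟩
    have t4 : ('R'::'E'::'Q'::'-'::(p1 ++ '-'::(p2 ++ '-'::p3))).take 4 = ['R','E','Q','-'] := rfl
    have d4 : ('R'::'E'::'Q'::'-'::(p1 ++ '-'::(p2 ++ '-'::p3))).drop 4 = p1 ++ '-'::(p2 ++ '-'::p3) := rfl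
    have d12 : ('R'::'E'::'Q'::'-'::(p1 ++ '-'::(p2 ++ '-'::p3))).drop 12 = '-'::(p2 ++ '-'::p3) := by
      show (p1 ++ '-'::(p2 ++ '-'::p3)).drop 8 = _
      exact List.drop_left' hl1
    have d13 : ('R'::'E'::'Q'::'-'::(p1 ++ '-'::(p2 ++ '-'::p3))).drop 13 = p2 ++ '-'::p3 := by
      have : ('R'::'E'::'Q'::'-'::(p1 ++ '-'::(p2 ++ '-'::p3))).drop 13
           = (('R'::'E'::'Q'::'-'::(p1 ++ '-'::(p2 ++ '-'::p3))).drop 12).drop 1 := by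
        rw [List.drop_drop]
      rw [this, d12]
      rfl
    have d19 : ('R'::'E'::'Q'::'-'::(p1 ++ '-'::(p2 ++ '-'::p3))).drop 19 = '-'::p3 := by
      have : ('R'::'E'::'Q'::'-'::(p1 ++ '-'::(p2 ++ '-'::p3))).drop 19
           = (('R'::'E'::'Q'::'-'::(p1 ++ '-'::(p2 ++ '-'::p3))).drop 13).drop 6 := by
        rw [List.drop_drop]
      rw [this, d13]
      exact List.drop_left' hl2
    have d20 : ('R'::'E'::'Q'::'-'::(p1 ++ '-'::(p2 ++ '-'::p3))).drop 20 = p3 := by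
      have : ('R'::'E'::'Q'::'-'::(p1 ++ '-'::(p2 ++ '-'::p3))).drop 20
           = (('R'::'E'::'Q'::'-'::(p1 ++ '-'::(p2 ++ '-'::p3))).drop 19).drop 1 := by
        rw [List.drop_drop]
      rw [this, d19]
      rfl
    refine ⟨⟨⟨⟨⟨t4, ?_⟩, ?_⟩, ?_⟩, ?_⟩, ?_⟩
    · rw [d12]
      rfl
    · rw [d19]
      rfl
    · rw [d4, List.take_left' hl1]
      exact hd1
    · rw [d13, List.take_left' hl2]
      exact hd2
    · rw [d20]
      exact hh

theorem shape_iff (cs : List Char) :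
    (∃ p1 p2 p3, mySplit cs = [['R','E','Q'], p1, p2, p3] ∧ Fields p1 p2 p3) ↔
    (∃ p1 p2 p3, cs = 'R'::'E'::'Q'::'-'::(p1 ++ '-'::(p2 ++ '-'::p3)) ∧ Fields p1 p2 p3) := by
  constructor
  · rintro ⟨p1, p2, p3, hp, hf⟩
    refine ⟨p1, p2, p3, ?_, hf⟩
    have := joinD_mySplit cs
    rw [hp] at this
    simpa [joinD] using this.symm
  · rintro ⟨p1, p2, p3, rfl, hf⟩
    refine ⟨p1, p2, p3, ?_, hf⟩
    obtain ⟨-, hd1, -, hd2, hh⟩ := hf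
    have h1 : '-' ∉ p1 := no_dash_of_digits _ hd1
    have h2 : '-' ∉ p2 := no_dash_of_digits _ hd2
    have h3 : '-' ∉ p3 := no_dash_of_hex _ hh
    have : ('R'::'E'::'Q'::'-'::(p1 ++ '-'::(p2 ++ '-'::p3)))
         = ['R','E','Q'] ++ '-'::(p1 ++ '-'::(p2 ++ '-'::p3)) := rfl
    rw [this, mySplit_append_dash _ _ (by simp), mySplit_append_dash _ _ h1,
        mySplit_append_dash _ _ h2, mySplit_dashfree _ h3]

-- ===== VERDICT (by name: the statement is the Claim_ definition above) =====
theorem validate_req_id_spec : Claim_equal_validate_req_id := by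
  intro s _
  unfold Spec_validate_req_id
  rw [Bool.eq_iff_iff, A_true_iff s, B_true_iff s, shape_iff s.toList]
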